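-- pv_equiv track=rewrite | github.com/fengyu586/Leetcode | 剑指offer/57.和为s的数字.py | FindNumbersWithSum1
-- ===== SOURCE A (Python) =====
-- def FindNumbersWithSum1(array, tsum):
--     # write code here
--     if not array:
--         return []
--     product = float('inf')
--     res = []
--     n = len(array)
--     for i in range(n-1):
--         target = tsum-array[i]
--         for j in range(i+1, n):
--             if array[j] == target:
--                 if product > array[i]*target:
--                     product = array[i]*target
--                     if not res:
--                         res += [array[i], target]
--                     else:
--                         res[:] = [array[i], target]
--     return res
-- ===== SOURCE B (Python) =====
-- def FindNumbersWithSum1(array, tsum):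
--     # One pass with a count table: `remaining[v]` = occurrences of v not yet scanned,
--     # so "complement occurs later" is an O(1) lookup instead of an inner scan.
--     remaining = {}
--     for x in array:
--         remaining[x] = remaining.get(x, 0) + 1
--     best = None
--     res = []
--     for x in array:
--         remaining[x] = remaining[x] - 1
--         c = tsum - x
--         if remaining.get(c, 0) > 0:
--             p = x * c
--             if best is None or p < best:
--                 best = p
--                 res = [x, c]
--     return res
-- ===== Notes on version B (the rewrite author's own statement) =====
-- stated objective: faster
-- what changed: Replaces A's O(n^2) nested index scan with a counting dict built in one pass plus a single scan that checks the complement's remaining count, keeping the first strictly-smaller-product pair.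
import Mathlib
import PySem

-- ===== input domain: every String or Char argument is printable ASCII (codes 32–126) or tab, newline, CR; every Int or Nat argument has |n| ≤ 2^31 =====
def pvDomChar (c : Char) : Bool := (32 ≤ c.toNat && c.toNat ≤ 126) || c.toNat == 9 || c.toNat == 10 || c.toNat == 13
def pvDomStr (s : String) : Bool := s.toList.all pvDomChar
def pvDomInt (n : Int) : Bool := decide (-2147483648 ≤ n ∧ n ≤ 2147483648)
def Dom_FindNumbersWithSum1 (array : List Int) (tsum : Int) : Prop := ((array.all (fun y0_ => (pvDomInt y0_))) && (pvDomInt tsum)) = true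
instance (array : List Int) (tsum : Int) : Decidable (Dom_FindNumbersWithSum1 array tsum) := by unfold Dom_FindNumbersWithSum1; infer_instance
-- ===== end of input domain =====

-- B replaces A's O(n^2) nested index scan by a counting dict (one counting pass, then one scan
-- checking the complement's remaining count); return values are proved identical.


-- ===== PORT A =====
-- `product = float('inf')` is modelled as `none` (greater than every int product; all other
-- products are exact ints).  Indices produced by the ranges are always in bounds, so
-- pyGetD with junk default 0 is exact here.
def FindNumbersWithSum1 (array : List Int) (tsum : Int) : List Int :=
  if array = [] then []
  else
    let n : Int := PySem.List.len array
    ((PySem.List.pyRange 0 (n - 1)).foldl (fun (s : Option Int × List Int) i =>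
      let ai := PySem.List.pyGetD array i 0
      let target := tsum - ai
      (PySem.List.pyRange (i + 1) n).foldl (fun s j =>
        if PySem.List.pyGetD array j 0 = target then
          if (match s.1 with | none => true | some q => decide (ai * target < q)) then
            (some (ai * target), if s.2 = [] then s.2 ++ [ai, target] else [ai, target])
          else s
        else s) s) ((none : Option Int), ([] : List Int))).2

-- ===== PORT B =====
-- `remaining[x] -= 1` : the key is always present there (the dict counts the same list),
-- so `getD _ 0` is exact for the lookup.
def FindNumbersWithSum1_alt (array : List Int) (tsum : Int) : List Int :=
  let remaining := array.foldl (fun (d : PySem.Dict Int Int) x => d.insert x (d.getD x 0 + 1)) PySem.Dict.empty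
  (array.foldl (fun (s : PySem.Dict Int Int × Option Int × List Int) x =>
      let d := s.1.insert x (s.1.getD x 0 - 1)
      let c := tsum - x
      if d.getD c 0 > 0 then
        if (match s.2.1 with | none => true | some b => decide (x * c < b)) then (d, some (x * c), [x, c])
        else (d, s.2.1, s.2.2)
      else (d, s.2.1, s.2.2)) (remaining, (none : Option Int), ([] : List Int))).2.2

-- ===== PRECONDITION & SPEC =====
def Spec_FindNumbersWithSum1 (array : List Int) (tsum : Int) (out : List Int) : Prop := out = FindNumbersWithSum1_alt array tsum
instance (array : List Int) (tsum : Int) (out : List Int) : Decidable (Spec_FindNumbersWithSum1 array tsum out) := by unfold Spec_FindNumbersWithSum1; infer_instance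

-- ===== CLAIM (what is proved, stated in full; the proofs are below) =====
def Claim_equal_FindNumbersWithSum1 : Prop := ∀ (array : List Int) (tsum : Int), Dom_FindNumbersWithSum1 array tsum → Spec_FindNumbersWithSum1 array tsum (FindNumbersWithSum1 array tsum)

-- ===== LEMMAS AND PROOFS =====

-- The common "record a strictly better pair" step both programs perform, on (best product?, result).
def pvStep (t : Int) (s : Option Int × List Int) (v : Int) : Option Int × List Int :=
  if (match s.1 with | none => true | some q => decide (v * (t - v) < q)) then
    (some (v * (t - v)), [v, t - v])
  else s

-- Reference loop: walk the list; at each element whose complement occurs later, try the step.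
def pvLoop (t : Int) : List Int → (Option Int × List Int) → Option Int × List Int
  | [], s => s
  | x :: rest, s => pvLoop t rest (if (t - x) ∈ rest then pvStep t s x else s)

theorem pvStep_idem (t : Int) (s : Option Int × List Int) (v : Int) :
    pvStep t (pvStep t s v) v = pvStep t s v := by
  rcases s with ⟨o, r⟩
  cases o with
  | none => simp [pvStep]
  | some q =>
    by_cases h : v * (t - v) < q
    · simp [pvStep, h]
    · simp [pvStep, h]

theorem pvInner_collapse (t v : Int) :
    ∀ (rest : List Int) (s : Option Int × List Int),
      rest.foldl (fun s y => if y = t - v then pvStep t s v else s) s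
        = if (t - v) ∈ rest then pvStep t s v else s := by
  intro rest
  induction rest with
  | nil => intro s; simp
  | cons y ys ih =>
    intro s
    by_cases hy : y = t - v
    · subst hy
      simp [List.foldl_cons, ih, pvStep_idem]
    · by_cases hm : (t - v) ∈ ys
      · rw [List.foldl_cons, if_neg hy, ih, if_pos hm, if_pos (List.mem_cons_of_mem _ hm)]
      · have hny : (t - v) ∉ y :: ys := by
          rw [List.mem_cons]
          rintro (h | h)
          · exact hy h.symm
          · exact hm h
        rw [List.foldl_cons, if_neg hy, ih, if_neg hm, if_neg hny]

-- A's inner body (after the index→element rewrite) is exactly the conditional pvStep.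
theorem pvABody_eq (t v : Int) (s : Option Int × List Int) (y : Int) :
    (if y = t - v then
      if (match s.1 with | none => true | some q => decide (v * (t - v) < q)) then
        (some (v * (t - v)), if s.2 = [] then s.2 ++ [v, t - v] else [v, t - v])
      else s
    else s)
    = (if y = t - v then pvStep t s v else s) := by
  unfold pvStep
  by_cases hy : y = t - v
  · rw [if_pos hy, if_pos hy]
    rcases s with ⟨o, r⟩
    cases o with
    | none => by_cases hr : r = [] <;> simp [hr]
    | some q =>
      by_cases h : v * (t - v) < q
      · by_cases hr : r = [] <;> simp [h, hr]
      · simp [h]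
  · rw [if_neg hy, if_neg hy]

-- A's outer index loop computes pvLoop on the remaining suffix.
theorem pvA_outer (array : List Int) (t : Int) :
    ∀ (todo : List Int) (a : Int), 0 ≤ a → array.drop a.toNat = todo →
      ∀ s, (PySem.List.pyRange a (PySem.List.len array - 1)).foldl
        (fun (s : Option Int × List Int) i =>
          let ai := PySem.List.pyGetD array i 0
          let target := t - ai
          (PySem.List.pyRange (i + 1) (PySem.List.len array)).foldl (fun s j =>
            if PySem.List.pyGetD array j 0 = target then
              if (match s.1 with | none => true | some q => decide (ai * target < q)) then
                (some (ai * target), if s.2 = [] then s.2 ++ [ai, target] else [ai, target])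
              else s
            else s) s) s
        = pvLoop t todo s := by
  intro todo
  induction todo with
  | nil =>
    intro a ha hdrop s
    have hlen : array.length ≤ a.toNat := List.drop_eq_nil_iff.mp hdrop
    rw [PySem.List.pyRange_one_eq_nil (by simp [PySem.List.len]; omega)]
    rfl
  | cons x rest ih =>
    intro a ha hdrop s
    have hlt : a.toNat < array.length := by
      by_contra h
      rw [List.drop_eq_nil_iff.mpr (by omega)] at hdrop
      simp at hdrop
    have hx : PySem.List.pyGetD array a 0 = x := by
      have h0 : array[a.toNat]? = some x := by
        have h1 := List.getElem?_drop (xs := array) (i := a.toNat) (j := 0)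
        rw [hdrop] at h1
        simpa using h1.symm
      have h2 := List.getElem?_eq_getElem (l := array) (i := a.toNat) hlt
      rw [h0] at h2
      rw [PySem.List.pyGetD_eq_getElem array 0 ha (by omega)]
      exact (Option.some.inj h2).symm
    have hrest : array.drop (a + 1).toNat = rest := by
      have : (a + 1).toNat = a.toNat + 1 := by omega
      rw [this, ← List.drop_drop]
      simp [hdrop]
    by_cases hend : a < PySem.List.len array - 1
    · rw [PySem.List.pyRange_one_cons hend, List.foldl_cons]
      -- the head iteration
      have hinner : ∀ s : Option Int × List Int,
          (PySem.List.pyRange (a + 1) (PySem.List.len array)).foldl (fun s j =>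
            if PySem.List.pyGetD array j 0 = t - x then
              if (match s.1 with | none => true | some q => decide (x * (t - x) < q)) then
                (some (x * (t - x)), if s.2 = [] then s.2 ++ [x, t - x] else [x, t - x])
              else s
            else s) s
          = (if (t - x) ∈ rest then pvStep t s x else s) := by
        intro s
        have hfold := PySem.List.foldl_pyRange_pyGetD array 0
          (fun (s : Option Int × List Int) y =>
            if y = t - x then
              if (match s.1 with | none => true | some q => decide (x * (t - x) < q)) then
                (some (x * (t - x)), if s.2 = [] then s.2 ++ [x, t - x] else [x, t - x])
              else s
            else s) s (a := a + 1) (by omega)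
        simp only at hfold
        rw [hfold, hrest]
        calc rest.foldl _ s
            = rest.foldl (fun s y => if y = t - x then pvStep t s x else s) s := by
              apply PySem.List.foldl_congr_mem
              intro acc y _
              exact pvABody_eq t x acc y
          _ = _ := pvInner_collapse t x rest s
      simp only [hx]
      rw [hinner s]
      rw [ih (a + 1) (by omega) hrest _]
      rfl
    · -- a = len - 1 : empty range, and rest = []
      have hlen' : (PySem.List.len array : Int) = (array.length : Int) := by
        simp [PySem.List.len]
      have hrestnil : rest = [] := by
        have : array.length ≤ (a + 1).toNat := by
          simp [PySem.List.len] at hend; omega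
        rw [← hrest, List.drop_eq_nil_iff.mpr this]
      rw [PySem.List.pyRange_one_eq_nil (by omega)]
      simp [pvLoop, hrestnil]

-- B's counting loop computes pvLoop when the dict holds the multiplicities of the suffix.
theorem pvB_loop (t : Int) :
    ∀ (todo : List Int) (d : PySem.Dict Int Int) (b : Option Int) (r : List Int),
      (∀ v, d.getD v 0 = (todo.count v : Int)) →
      (todo.foldl (fun (s : PySem.Dict Int Int × Option Int × List Int) x =>
        let d := s.1.insert x (s.1.getD x 0 - 1)
        let c := t - x
        if d.getD c 0 > 0 then
          if (match s.2.1 with | none => true | some bb => decide (x * c < bb)) then (d, some (x * c), [x, c])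
          else (d, s.2.1, s.2.2)
        else (d, s.2.1, s.2.2)) (d, b, r)).2
      = pvLoop t todo (b, r) := by
  intro todo
  induction todo with
  | nil => intro d b r _; rfl
  | cons x rest ih =>
    intro d b r h
    have h' : ∀ v, (d.insert x (d.getD x 0 - 1)).getD v 0 = (rest.count v : Int) := by
      intro v
      rw [PySem.Dict.getD_insert]
      by_cases hv : v = x
      · subst hv
        rw [if_pos rfl, h, List.count_cons_self]
        push_cast
        ring
      · rw [if_neg hv, h]
        have hxv : ¬ x = v := fun hh => hv hh.symm
        simp [hxv]
    have hcond : ((d.insert x (d.getD x 0 - 1)).getD (t - x) 0 > 0) ↔ ((t - x) ∈ rest) := by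
      rw [h']
      constructor
      · intro hp
        exact List.count_pos_iff.mp (by exact_mod_cast hp)
      · intro hm
        exact_mod_cast List.count_pos_iff.mpr hm
    have hstep :
        (if (d.insert x (d.getD x 0 - 1)).getD (t - x) 0 > 0 then
           if (match b with | none => true | some bb => decide (x * (t - x) < bb)) then
             (d.insert x (d.getD x 0 - 1), some (x * (t - x)), [x, t - x])
           else (d.insert x (d.getD x 0 - 1), b, r)
         else (d.insert x (d.getD x 0 - 1), b, r))
        = (d.insert x (d.getD x 0 - 1),
            (if (t - x) ∈ rest then pvStep t (b, r) x else (b, r))) := by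
      by_cases hm : (t - x) ∈ rest
      · rw [if_pos (hcond.mpr hm), if_pos hm]
        cases b with
        | none => rfl
        | some bb => by_cases hlt : x * (t - x) < bb <;> simp [pvStep, hlt]
      · rw [if_neg (fun hp => hm (hcond.mp hp)), if_neg hm]
    simp only [List.foldl_cons]
    rw [hstep]
    conv_rhs => rw [pvLoop]
    have hrec := ih (d.insert x (d.getD x 0 - 1))
      (if (t - x) ∈ rest then pvStep t (b, r) x else (b, r)).1
      (if (t - x) ∈ rest then pvStep t (b, r) x else (b, r)).2 h'
    simpa using hrec

theorem pvA_eq (array : List Int) (t : Int) :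
    FindNumbersWithSum1 array t = (pvLoop t array ((none : Option Int), ([] : List Int))).2 := by
  unfold FindNumbersWithSum1
  by_cases h : array = []
  · subst h; rfl
  · rw [if_neg h]
    have := pvA_outer array t array 0 le_rfl (by simp) ((none : Option Int), ([] : List Int))
    simp only at this
    rw [← this]

theorem pvB_eq (array : List Int) (t : Int) :
    FindNumbersWithSum1_alt array t = (pvLoop t array ((none : Option Int), ([] : List Int))).2 := by
  unfold FindNumbersWithSum1_alt
  have hcnt : ∀ v, (array.foldl (fun (d : PySem.Dict Int Int) x => d.insert x (d.getD x 0 + 1)) PySem.Dict.empty).getD v 0 = (array.count v : Int) := by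
    intro v
    rw [PySem.Dict.getD_foldl_insert_add_one]
    simp
  exact congrArg Prod.snd (pvB_loop t array _ none [] hcnt)

-- ===== VERDICT (by name: the statement is the Claim_ definition above) =====
theorem FindNumbersWithSum1_spec : Claim_equal_FindNumbersWithSum1 := by
  intro array tsum _
  unfold Spec_FindNumbersWithSum1
  rw [pvA_eq, pvB_eq]
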